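-- pv_equiv track=rewrite | github.com/andrekwr/search_engine | se/query.py | parse_raw_query
-- ===== SOURCE A (Python) =====
-- def parse_raw_query_or(q, i, n):
--     result = f'["term", "{q[i]}"]'
--     i += 1
--     if i == n:
--         return result, i
--     if len(q) % 2 == 0:
--         raise Exception("Query incompleta.")
--     elif len(q) > 1:
--         while q[i] == "or":
--             res, i = parse_raw_query_or(q, i + 1, n)
--             result = f'["or", {result}, {res}]'
--             if i == n:
--                 return result, i
--
--     return result, i
--
-- def parse_raw_query(raw_query: str):
--     q = raw_query.split()
--     n = len(q)
--     result, i = parse_raw_query_or(q, 0, n)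
--     if i == n:
--         return result
--     while q[i] == "and":
--         res, i = parse_raw_query_or(q, i + 1, n)
--         result = f'["and", {result}, {res}]'
--         if i == n:
--             return result
--     return result
-- ===== SOURCE B (Python) =====
-- def parse_raw_query(raw_query: str):
--     q = raw_query.split()
--     n = len(q)
--
--     def or_group(i):
--         # collect the whole run of or-separated terms iteratively, then nest right
--         terms = [f'["term", "{q[i]}"]']
--         i += 1
--         while i < n and q[i] == "or":
--             terms.append(f'["term", "{q[i + 1]}"]')
--             i += 2
--         expr = terms[-1]
--         for t in reversed(terms[:-1]):
--             expr = f'["or", {t}, {expr}]'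
--         return expr, i
--
--     result, i = or_group(0)
--     while i < n and q[i] == "and":
--         res, i = or_group(i + 1)
--         result = f'["and", {result}, {res}]'
--     return result
-- ===== Notes on version B (the rewrite author's own statement) =====
-- stated objective: alternative
-- what changed: replaces the recursive or-parser (nested recursion inside a while loop) with an iterative scan that collects the whole run of or-separated terms into a list and then folds it from the right; both loops use explicit bound checks instead of early returns
import Mathlib
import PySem

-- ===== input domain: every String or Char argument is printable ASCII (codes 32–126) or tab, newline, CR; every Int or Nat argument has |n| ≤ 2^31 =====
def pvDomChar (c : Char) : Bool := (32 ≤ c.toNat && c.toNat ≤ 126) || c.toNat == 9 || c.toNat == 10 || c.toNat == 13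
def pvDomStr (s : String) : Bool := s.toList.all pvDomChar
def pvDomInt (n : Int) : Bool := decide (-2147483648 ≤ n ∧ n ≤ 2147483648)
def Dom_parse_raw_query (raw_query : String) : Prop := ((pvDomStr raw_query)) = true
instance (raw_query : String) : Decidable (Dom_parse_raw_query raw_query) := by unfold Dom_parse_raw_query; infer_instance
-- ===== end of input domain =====

-- B keeps A's outer and-loop but replaces the recursive or-parser by an iterative scan plus a right fold (alternative decomposition, no speed claim).

-- ===== PORT A =====
def pvTermA (s : String) : String := "[\"term\", \"" ++ s ++ "\"]"

mutual
-- parse_raw_query_or: the fuel only makes the nested recursion total; a raise returns a dummy ("", i) (excluded by Pre_)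
def pvOrA : Nat → List String → Nat → Nat → String × Nat
  | 0, _, i, _ => ("", i)
  | fuel + 1, q, j, n =>
    let result := pvTermA (q.getD j "")
    let i := j + 1
    if i = n then (result, i)
    else if q.length % 2 = 0 then ("", i)     -- Python: raise Exception (incomplete query)
    else if 1 < q.length then pvOrWhileA fuel q i n result
    else (result, i)
def pvOrWhileA : Nat → List String → Nat → Nat → String → String × Nat
  | 0, _, i, _, r => (r, i)
  | fuel + 1, q, i, n, result =>
    if q.getD i "" = "or" then
      let p := pvOrA fuel q (i + 1) n
      let result' := "[\"or\", " ++ result ++ ", " ++ p.1 ++ "]"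
      if p.2 = n then (result', p.2) else pvOrWhileA fuel q p.2 n result'
    else (result, i)
end

def pvAndA : Nat → List String → Nat → Nat → String → String
  | 0, _, _, _, r => r
  | fuel + 1, q, i, n, result =>
    if q.getD i "" = "and" then
      let p := pvOrA fuel q (i + 1) n
      let result' := "[\"and\", " ++ result ++ ", " ++ p.1 ++ "]"
      if p.2 = n then result' else pvAndA fuel q p.2 n result'
    else result

def parse_raw_query (raw_query : String) : String :=
  let q := PySem.Str.split₀ raw_query
  let n := q.length
  let p := pvOrA (2 * n + 6) q 0 n
  if p.2 = n then p.1 else pvAndA (2 * n + 6) q p.2 n p.1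

-- ===== PORT B =====
def pvTermB (s : String) : String := "[\"term\", \"" ++ s ++ "\"]"

-- the iterative while-loop collecting the run of or-separated terms
def pvOrScanB (q : List String) (n i : Nat) (acc : List String) : List String × Nat :=
  if _h : i < n ∧ q.getD i "" = "or" then
    pvOrScanB q n (i + 2) (acc ++ [pvTermB (q.getD (i + 1) "")])
  else (acc, i)
termination_by n - i
decreasing_by omega

-- expr = terms[-1]; for t in reversed(terms[:-1]): expr = ["or", t, expr]
def pvFoldB (terms : List String) : String :=
  terms.dropLast.reverse.foldl (fun e t => "[\"or\", " ++ t ++ ", " ++ e ++ "]") (terms.getLastD "")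

def pvOrGroupB (q : List String) (n i : Nat) : String × Nat :=
  let p := pvOrScanB q n (i + 1) []
  (pvFoldB (pvTermB (q.getD i "") :: p.1), p.2)

def pvAndB : Nat → List String → Nat → Nat → String → String
  | 0, _, _, _, r => r
  | fuel + 1, q, i, n, result =>
    if i < n ∧ q.getD i "" = "and" then
      let p := pvOrGroupB q n (i + 1)
      pvAndB fuel q p.2 n ("[\"and\", " ++ result ++ ", " ++ p.1 ++ "]")
    else result

def parse_raw_query_alt (raw_query : String) : String :=
  let q := PySem.Str.split₀ raw_query
  let n := q.length
  let p := pvOrGroupB q n 0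
  pvAndB (n + 2) q p.2 n p.1

-- ===== PRECONDITION & SPEC =====
-- Pre_ excludes exactly the inputs on which A raises: an even number of tokens
-- (IndexError on the empty query, an Exception for an incomplete query otherwise); A returns on every odd-length token list.
def Pre_parse_raw_query (raw_query : String) : Prop :=
  (PySem.Str.split₀ raw_query).length % 2 = 1
instance (raw_query : String) : Decidable (Pre_parse_raw_query raw_query) := by
  unfold Pre_parse_raw_query; infer_instance

def pvWitness_parse_raw_query : String := "apple or banana and cherry"

def Spec_parse_raw_query (raw_query : String) (out : String) : Prop := out = parse_raw_query_alt raw_query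
instance (raw_query : String) (out : String) : Decidable (Spec_parse_raw_query raw_query out) := by unfold Spec_parse_raw_query; infer_instance

-- ===== CLAIM (what is proved, stated in full; the proofs are below) =====
def Claim_equal_parse_raw_query : Prop := ∀ (raw_query : String), Dom_parse_raw_query raw_query → Pre_parse_raw_query raw_query → Spec_parse_raw_query raw_query (parse_raw_query raw_query)

-- ===== LEMMAS AND PROOFS =====

theorem pvGetD_oob {q : List String} {i : Nat} (h : q.length ≤ i) : q.getD i "" = "" :=
  List.getD_eq_default q "" h

theorem pvOrScanB_acc (q : List String) (n : Nat) :
    ∀ (k i : Nat), n - i ≤ k → ∀ acc, pvOrScanB q n i acc =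
      (acc ++ (pvOrScanB q n i []).1, (pvOrScanB q n i []).2) := by
  intro k
  induction k with
  | zero =>
    intro i hk acc
    have hc : ¬ (i < n ∧ q.getD i "" = "or") := by omega
    rw [pvOrScanB, dif_neg hc, pvOrScanB, dif_neg hc]
    simp
  | succ k ih =>
    intro i hk acc
    by_cases hc : i < n ∧ q.getD i "" = "or"
    · have hk2 : n - (i + 2) ≤ k := by omega
      rw [pvOrScanB, dif_pos hc]
      conv_rhs => rw [pvOrScanB, dif_pos hc]
      rw [ih (i + 2) hk2 (acc ++ [pvTermB (q.getD (i + 1) "")]),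
          ih (i + 2) hk2 ([] ++ [pvTermB (q.getD (i + 1) "")])]
      simp
    · rw [pvOrScanB, dif_neg hc, pvOrScanB, dif_neg hc]
      simp

theorem pvFoldB_single (x : String) : pvFoldB [x] = x := by
  simp [pvFoldB]

theorem pvFoldB_cons (x y : String) (rest : List String) :
    pvFoldB (x :: y :: rest) = "[\"or\", " ++ x ++ ", " ++ pvFoldB (y :: rest) ++ "]" := by
  simp [pvFoldB, List.foldl_append]

theorem pvOr_main (q : List String) (hodd : q.length % 2 = 1) (fuel : Nat) :
    ∀ j, j ≤ q.length → 2 * (q.length + 2 - j) ≤ fuel →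
      pvOrA fuel q j q.length = pvOrGroupB q q.length j ∧
      j < (pvOrGroupB q q.length j).2 ∧
      (pvOrGroupB q q.length j).2 ≤ q.length + 1 ∧
      ((pvOrGroupB q q.length j).2 = q.length ∨ q.getD (pvOrGroupB q q.length j).2 "" ≠ "or") := by
  induction fuel using Nat.strong_induction_on with
  | _ fuel ih =>
  intro j hj hf
  set n := q.length with hn
  have hne : ¬ (n % 2 = 0) := by omega
  obtain ⟨f, rfl⟩ : ∃ f, fuel = f + 2 := ⟨fuel - 2, by omega⟩
  by_cases hjn : j = n
  · -- the (unreachable-under-Python) call at j = n: both return (term "", n+1)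
    subst hjn
    have hg : q.getD n "" = "" := pvGetD_oob (by omega)
    have hg1 : q.getD (n + 1) "" = "" := pvGetD_oob (by omega)
    have hscan : pvOrScanB q n (n + 1) [] = ([], n + 1) := by
      rw [pvOrScanB, dif_neg]; omega
    have hB : pvOrGroupB q n n = (pvTermB "", n + 1) := by
      simp only [pvOrGroupB, hscan, hg, pvFoldB_single]
    rw [hB]
    refine ⟨?_, by omega, by omega, Or.inr (by rw [hg1]; decide)⟩
    simp only [pvOrA, hg]
    rw [if_neg (by omega), if_neg hne]
    by_cases h1 : 1 < n
    · rw [if_pos h1, pvOrWhileA, if_neg (by rw [hg1]; decide)]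
      simp [pvTermA, pvTermB]
    · rw [if_neg h1]; simp [pvTermA, pvTermB]
  · have hjlt : j < n := by omega
    by_cases hend : j + 1 = n
    · -- last token: single term, stop at n
      have hscan : pvOrScanB q n (j + 1) [] = ([], j + 1) := by
        rw [pvOrScanB, dif_neg]; omega
      have hB : pvOrGroupB q n j = (pvTermB (q.getD j ""), j + 1) := by
        simp only [pvOrGroupB, hscan, pvFoldB_single]
      rw [hB]
      refine ⟨?_, by omega, by omega, Or.inl hend⟩
      simp only [pvOrA]
      rw [if_pos hend]
      simp [pvTermA, pvTermB]
    · have hlt : j + 1 < n := by omega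
      have h1n : 1 < n := by omega
      by_cases hor : q.getD (j + 1) "" = "or"
      · -- an 'or' follows: A recurses, B scans one more term
        have hIH := ih (f) (by omega) (j + 2) (by omega) (by omega)
        set P := pvOrGroupB q n (j + 2) with hP
        obtain ⟨hAeq, hPlt, hPle, hPstop⟩ := hIH
        -- B side: scan unfolds one step
        have hcond : j + 1 < n ∧ q.getD (j + 1) "" = "or" := ⟨hlt, hor⟩
        have hscan : pvOrScanB q n (j + 1) [] =
            (pvTermB (q.getD (j + 2) "") :: (pvOrScanB q n (j + 3) []).1,
             (pvOrScanB q n (j + 3) []).2) := by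
          rw [pvOrScanB, dif_pos hcond]
          rw [pvOrScanB_acc q n (n - (j + 3)) (j + 3) (by omega)]
          simp
        have hPdef : P = (pvFoldB (pvTermB (q.getD (j + 2) "") :: (pvOrScanB q n (j + 3) []).1),
            (pvOrScanB q n (j + 3) []).2) := by
          rw [hP]; simp [pvOrGroupB]
        have hB : pvOrGroupB q n j =
            ("[\"or\", " ++ pvTermB (q.getD j "") ++ ", " ++ P.1 ++ "]", P.2) := by
          simp only [pvOrGroupB, hscan, hPdef]
          rw [pvFoldB_cons]
        rw [hB]
        refine ⟨?_, by omega, by omega, ?_⟩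
        · -- A side
          simp only [pvOrA]
          rw [if_neg (show ¬ (j + 1 = n) by omega), if_neg hne, if_pos h1n]
          rw [pvOrWhileA, if_pos hor]
          obtain ⟨f', rfl⟩ : ∃ f', f = f' + 1 := ⟨f - 1, by omega⟩
          have hAeq' : pvOrA (f' + 1) q (j + 2) n = P := hAeq
          simp only [hAeq']
          by_cases hPn : P.2 = n
          · rw [if_pos hPn]; simp [pvTermA, pvTermB]
          · rw [if_neg hPn]
            have hstop : q.getD P.2 "" ≠ "or" := by
              rcases hPstop with h | h
              · exact absurd h hPn
              · exact h
            rw [pvOrWhileA, if_neg hstop]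
            simp [pvTermA, pvTermB]
        · rcases hPstop with h | h
          · exact Or.inl h
          · exact Or.inr h
      · -- no 'or' follows: return (term q[j], j+1)
        have hscan : pvOrScanB q n (j + 1) [] = ([], j + 1) := by
          rw [pvOrScanB, dif_neg (by exact fun h => hor h.2)]
        have hB : pvOrGroupB q n j = (pvTermB (q.getD j ""), j + 1) := by
          simp only [pvOrGroupB, hscan, pvFoldB_single]
        rw [hB]
        refine ⟨?_, by omega, by omega, Or.inr hor⟩
        simp only [pvOrA]
        rw [if_neg (show ¬ (j + 1 = n) by omega), if_neg hne, if_pos h1n]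
        obtain ⟨f', rfl⟩ : ∃ f', f = f' + 1 := ⟨f - 1, by omega⟩
        rw [pvOrWhileA, if_neg hor]
        simp [pvTermA, pvTermB]

theorem pvAndB_stop : ∀ (b : Nat) (q : List String) (n : Nat) (r : String), pvAndB b q n n r = r
  | 0, _, _, _ => rfl
  | _ + 1, q, n, r => by
    rw [pvAndB, if_neg (show ¬ (n < n ∧ q.getD n "" = "and") from fun h => absurd h.1 (Nat.lt_irrefl n))]

theorem pvAnd_main (q : List String) (hodd : q.length % 2 = 1) (fA : Nat) :
    ∀ fB i r, i ≤ q.length + 1 → 2 * (q.length + 2 - i) ≤ fA → q.length + 2 - i ≤ fB →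
      pvAndA fA q i q.length r = pvAndB fB q i q.length r := by
  induction fA using Nat.strong_induction_on with
  | _ fA ih =>
  intro fB i r hi hfA hfB
  set n := q.length with hn
  obtain ⟨a, rfl⟩ : ∃ a, fA = a + 1 := ⟨fA - 1, by omega⟩
  obtain ⟨b, rfl⟩ : ∃ b, fB = b + 1 := ⟨fB - 1, by omega⟩
  by_cases hand : q.getD i "" = "and"
  · have hiltn : i < n := by
      by_contra h
      rw [pvGetD_oob (by omega)] at hand
      exact absurd hand (by decide)
    have hOr := pvOr_main q hodd a (i + 1) (by omega) (by omega)
    set P := pvOrGroupB q n (i + 1) with hP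
    obtain ⟨hAeq, hPlt, hPle, _⟩ := hOr
    simp only [pvAndA, pvAndB]
    rw [if_pos hand, if_pos (show i < n ∧ q.getD i "" = "and" from ⟨hiltn, hand⟩)]
    rw [← hn] at hAeq
    rw [hAeq]
    by_cases hPn : P.2 = n
    · rw [if_pos hPn, hPn, pvAndB_stop]
    · rw [if_neg hPn]
      exact ih a (by omega) b P.2 _ (by omega) (by omega) (by omega)
  · rw [pvAndA, if_neg hand, pvAndB, if_neg (fun h => hand h.2)]

-- ===== VERDICT (by name: the statement is the Claim_ definition above) =====
theorem parse_raw_query_spec : Claim_equal_parse_raw_query := by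
  intro raw_query _ hpre
  unfold Spec_parse_raw_query parse_raw_query parse_raw_query_alt
  set q := PySem.Str.split₀ raw_query with hq
  set n := q.length with hn
  have hodd : n % 2 = 1 := hpre
  simp only []
  have hOr := pvOr_main q hodd (2 * n + 6) 0 (by omega) (by omega)
  set P := pvOrGroupB q n 0 with hP
  obtain ⟨hAeq, hPlt, hPle, _⟩ := hOr
  rw [hAeq]
  by_cases hPn : P.2 = n
  · rw [if_pos hPn, hPn, pvAndB_stop]
  · rw [if_neg hPn]
    exact pvAnd_main q hodd (2 * n + 6) (n + 2) P.2 P.1 (by omega) (by omega) (by omega)
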